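-- pv_equiv track=rewrite | github.com/spenchamb/Distributed-Systems-Projs | assignment3/invertedindex.py | _do_reduce
-- ===== SOURCE A (Python) =====
-- def _do_reduce(maps):
--   result_dict = {}
--   for mapp in maps:
--     if not (mapp[0] in result_dict):
--       result_dict[mapp[0]] = {}
--       result_dict[mapp[0]][mapp[2]] = 1
--     else: #if word has been found before
--       try:
--         result_dict[mapp[0]][mapp[2]] += 1
--       except KeyError: #word hasn't been found in a given doc yet
--         result_dict[mapp[0]][mapp[2]] = 1
--   return result_dict
-- ===== SOURCE B (Python) =====
-- def _do_reduce(maps):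
--   flat = {}
--   for mapp in maps:
--     key = (mapp[0], mapp[2])
--     flat[key] = flat.get(key, 0) + 1
--   result = {}
--   for (word, doc), count in flat.items():
--     inner = result.get(word)
--     if inner is None:
--       result[word] = {doc: count}
--     else:
--       inner[doc] = count
--   return result
-- ===== Notes on version B (the rewrite author's own statement) =====
-- stated objective: alternative
-- what changed: A builds the nested word->doc->count dict in one loop with an existence check and try/except per tuple; B first builds a flat counter keyed by the (word, doc) pair in one pass and then regroups that table into the nested dict in a second pass.
import Mathlib
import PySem

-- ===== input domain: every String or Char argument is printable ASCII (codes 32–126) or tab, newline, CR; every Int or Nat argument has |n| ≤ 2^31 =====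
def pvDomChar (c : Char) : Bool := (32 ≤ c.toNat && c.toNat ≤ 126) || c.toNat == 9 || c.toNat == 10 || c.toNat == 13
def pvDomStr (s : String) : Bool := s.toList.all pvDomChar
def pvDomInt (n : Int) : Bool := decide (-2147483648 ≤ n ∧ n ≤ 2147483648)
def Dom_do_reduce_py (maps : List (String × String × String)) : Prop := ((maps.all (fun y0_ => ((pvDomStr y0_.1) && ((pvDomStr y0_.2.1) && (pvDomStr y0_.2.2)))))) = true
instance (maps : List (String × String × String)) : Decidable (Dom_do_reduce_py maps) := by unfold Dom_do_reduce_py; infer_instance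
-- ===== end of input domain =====

-- B replaces A's nested-dict existence-check loop by a two-pass decomposition (flat (word,doc)-pair counter, then regroup); objective: alternative.


-- ===== PORT A =====
-- one iteration of A's loop: existence check on the word, then try/except on the doc
def stepA_do_reduce (d : PySem.Dict String (PySem.Dict String Int))
    (m : String × String × String) : PySem.Dict String (PySem.Dict String Int) :=
  if d.contains m.1 = false then
    d.insert m.1 ((PySem.Dict.empty : PySem.Dict String Int).insert m.2.2 1)
  else
    match (d.getD m.1 PySem.Dict.empty).get? m.2.2 with
    | some v => d.insert m.1 ((d.getD m.1 PySem.Dict.empty).insert m.2.2 (v + 1))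
    | none   => d.insert m.1 ((d.getD m.1 PySem.Dict.empty).insert m.2.2 1)

def do_reduce_py (maps : List (String × String × String)) : List (String × List (String × Int)) :=
  ((maps.foldl stepA_do_reduce PySem.Dict.empty).items.map (fun p => (p.1, p.2.items)))

-- ===== PORT B =====
-- pass 1: flat counter keyed by the (word, doc) pair
def stepFlat_do_reduce (f : PySem.Dict (String × String) Int)
    (m : String × String × String) : PySem.Dict (String × String) Int :=
  f.insert (m.1, m.2.2) (f.getD (m.1, m.2.2) 0 + 1)

-- pass 2: regroup one flat item into the nested result
def stepB_do_reduce (r : PySem.Dict String (PySem.Dict String Int))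
    (p : (String × String) × Int) : PySem.Dict String (PySem.Dict String Int) :=
  match r.get? p.1.1 with
  | none       => r.insert p.1.1 ((PySem.Dict.empty : PySem.Dict String Int).insert p.1.2 p.2)
  | some inner => r.insert p.1.1 (inner.insert p.1.2 p.2)

def do_reduce_py_alt (maps : List (String × String × String)) : List (String × List (String × Int)) :=
  let flat := maps.foldl stepFlat_do_reduce PySem.Dict.empty
  let nested := flat.items.foldl stepB_do_reduce PySem.Dict.empty
  nested.items.map (fun p => (p.1, p.2.items))

-- ===== PRECONDITION & SPEC =====
def Spec_do_reduce_py (maps : List (String × String × String)) (out : List (String × List (String × Int))) : Prop := out = do_reduce_py_alt maps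
instance (maps : List (String × String × String)) (out : List (String × List (String × Int))) : Decidable (Spec_do_reduce_py maps out) := by unfold Spec_do_reduce_py; infer_instance

-- ===== CLAIM (what is proved, stated in full; the proofs are below) =====
def Claim_equal_do_reduce_py : Prop := ∀ (maps : List (String × String × String)), Dom_do_reduce_py maps → Spec_do_reduce_py maps (do_reduce_py maps)

-- ===== LEMMAS AND PROOFS =====

-- the words of a flat item list, in first-occurrence order
def gKeys (l : List ((String × String) × Int)) : List String :=
  PySem.Set.ofList (l.map (fun p => p.1.1))

-- the inner association list of word w
def gVal (l : List ((String × String) × Int)) (w : String) : List (String × Int) :=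
  (l.filter (fun p => p.1.1 == w)).map (fun p => (p.1.2, p.2))

-- the nested dict B's second pass builds, in closed form
def gSpec (l : List ((String × String) × Int)) : PySem.Dict String (PySem.Dict String Int) :=
  PySem.Dict.mk ((gKeys l).map (fun w => (w, PySem.Dict.mk (gVal l w))))

theorem mkmap_get? (ks : List String) (g : String → PySem.Dict String Int) (w : String) :
    (PySem.Dict.mk (ks.map (fun k => (k, g k)))).get? w = if w ∈ ks then some (g w) else none := by
  induction ks with
  | nil => rw [if_neg List.not_mem_nil]; rfl
  | cons k ks ih =>
      simp only [List.map_cons, PySem.Dict.get?_mk_cons]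
      by_cases h : k = w
      · subst h; simp
      · have hwk : ¬ w = k := fun hh => h hh.symm
        simp only [beq_iff_eq, h, if_false, ih, List.mem_cons, hwk, false_or]

theorem gSpec_get? (l : List ((String × String) × Int)) (w : String) :
    (gSpec l).get? w = if w ∈ gKeys l then some (PySem.Dict.mk (gVal l w)) else none :=
  mkmap_get? (gKeys l) (fun k => PySem.Dict.mk (gVal l k)) w

theorem gSpec_keys (l : List ((String × String) × Int)) : (gSpec l).keys = gKeys l := by
  show ((gKeys l).map (fun w => (w, PySem.Dict.mk (gVal l w)))).map (fun x => x.1) = gKeys l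
  rw [List.map_map]
  exact (List.map_congr_left (fun a _ => rfl)).trans (List.map_id _)

theorem gSpec_contains (l : List ((String × String) × Int)) (w : String) :
    (gSpec l).contains w = decide (w ∈ gKeys l) := by
  rw [PySem.Dict.contains_eq_decide_mem_keys, gSpec_keys]

theorem gSpec_getD (l : List ((String × String) × Int)) (w : String) (hw : w ∈ gKeys l) :
    (gSpec l).getD w PySem.Dict.empty = PySem.Dict.mk (gVal l w) :=
  PySem.Dict.getD_of_get?_eq_some _ _ (by rw [gSpec_get?, if_pos hw])

theorem mkmap_insert (ks : List String) (g : String → PySem.Dict String Int) (w : String)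
    (v : PySem.Dict String Int) (hw : w ∈ ks) :
    (PySem.Dict.mk (ks.map (fun k => (k, g k)))).insert w v
      = PySem.Dict.mk (ks.map (fun k => (k, if k = w then v else g k))) := by
  apply PySem.Dict.ext
  rw [PySem.Dict.items_insert_of_contains _ v
      (by rw [PySem.Dict.contains_eq_decide_mem_keys]; simp [PySem.Dict.keys_mk, List.map_map, hw])]
  show (ks.map (fun k => (k, g k))).map (fun p => if p.1 == w then (w, v) else p) = _
  rw [List.map_map]
  apply List.map_congr_left
  intro k _
  by_cases h : k = w
  · subst h; simp
  · simp [h]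

theorem mem_gKeys (l : List ((String × String) × Int)) (w : String) :
    w ∈ gKeys l ↔ w ∈ l.map (fun p => p.1.1) := by
  simp [gKeys, PySem.Set.mem_ofList]

theorem gKeys_append (l : List ((String × String) × Int)) (p : (String × String) × Int) :
    gKeys (l ++ [p]) = if p.1.1 ∈ gKeys l then gKeys l else gKeys l ++ [p.1.1] := by
  unfold gKeys
  rw [List.map_append, PySem.Set.ofList_append]
  show (PySem.Set.ofList (l.map (fun p => p.1.1))).add p.1.1 = _
  by_cases h : p.1.1 ∈ PySem.Set.ofList (l.map (fun p => p.1.1))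
  · rw [if_pos h, PySem.Set.add_of_mem h]
  · rw [if_neg h, PySem.Set.add_of_not_mem h]

theorem gVal_cons (x : (String × String) × Int) (l : List ((String × String) × Int)) (w : String) :
    gVal (x :: l) w = (if x.1.1 == w then [(x.1.2, x.2)] else []) ++ gVal l w := by
  unfold gVal
  rw [List.filter_cons]
  by_cases h : (x.1.1 == w) = true <;> simp [h]

theorem gVal_append (l : List ((String × String) × Int)) (p : (String × String) × Int) (w : String) :
    gVal (l ++ [p]) w = gVal l w ++ (if p.1.1 == w then [(p.1.2, p.2)] else []) := by
  unfold gVal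
  rw [List.filter_append]
  by_cases h : (p.1.1 == w) = true <;> simp [h]

theorem gVal_nil_of_not_mem (l : List ((String × String) × Int)) (w : String)
    (h : w ∉ gKeys l) : gVal l w = [] := by
  unfold gVal
  have hf : l.filter (fun p => p.1.1 == w) = [] := by
    rw [List.filter_eq_nil_iff]
    intro q hq hbq
    exact h ((mem_gKeys l w).mpr (List.mem_map.mpr ⟨q, hq, by simpa using hbq⟩))
  simp [hf]

theorem mem_gVal_iff (l : List ((String × String) × Int)) (w c : String) (x : Int) :
    (c, x) ∈ gVal l w ↔ ((w, c), x) ∈ l := by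
  constructor
  · intro h
    obtain ⟨⟨⟨a, b⟩, y⟩, hq, he⟩ := List.mem_map.mp h
    obtain ⟨hql, hqw⟩ := List.mem_filter.mp hq
    have ha : a = w := by simpa using hqw
    have hb : b = c := by simpa using congrArg Prod.fst he
    have hy : y = x := by simpa using congrArg Prod.snd he
    subst ha; subst hb; subst hy; exact hql
  · intro h
    exact List.mem_map.mpr ⟨((w, c), x), List.mem_filter.mpr ⟨h, by simp⟩, rfl⟩

theorem nodup_gVal_keys (l : List ((String × String) × Int))
    (hnd : (l.map (fun q => q.1)).Nodup) (w : String) :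
    ((gVal l w).map (fun e => e.1)).Nodup := by
  have h1 : ((l.filter (fun p => p.1.1 == w)).map (fun q => q.1)).Nodup :=
    hnd.sublist ((l.filter_sublist (p := fun p => p.1.1 == w)).map (fun q => q.1))
  have h2 : (gVal l w).map (fun e => e.1)
      = ((l.filter (fun p => p.1.1 == w)).map (fun q => q.1)).map Prod.snd := by
    simp [gVal, List.map_map]
  rw [h2]
  refine List.Nodup.map_on ?_ h1
  intro x hx y hy he
  obtain ⟨qx, hqx, hex⟩ := List.mem_map.mp hx
  obtain ⟨qy, hqy, hey⟩ := List.mem_map.mp hy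
  have hxw : x.1 = w := by
    have := (List.mem_filter.mp hqx).2; subst hex; simpa using this
  have hyw : y.1 = w := by
    have := (List.mem_filter.mp hqy).2; subst hey; simpa using this
  cases x; cases y
  simp only at hxw hyw he
  simp [hxw, hyw, he]

-- the two step functions written as if-then-else over contains/getD
theorem stepB_eq (r : PySem.Dict String (PySem.Dict String Int)) (p : (String × String) × Int) :
    stepB_do_reduce r p =
      if r.contains p.1.1 = false then
        r.insert p.1.1 ((PySem.Dict.empty : PySem.Dict String Int).insert p.1.2 p.2)
      else r.insert p.1.1 ((r.getD p.1.1 PySem.Dict.empty).insert p.1.2 p.2) := by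
  unfold stepB_do_reduce
  cases hg : r.get? p.1.1 with
  | none => rw [if_pos (by rw [PySem.Dict.contains_eq_isSome_get?, hg]; rfl)]
  | some inner =>
      rw [if_neg (by rw [PySem.Dict.contains_eq_isSome_get?, hg]; simp)]
      rw [PySem.Dict.getD_of_get?_eq_some r PySem.Dict.empty hg]

theorem stepA_eq (dd : PySem.Dict String (PySem.Dict String Int)) (m : String × String × String) :
    stepA_do_reduce dd m =
      if dd.contains m.1 = false then
        dd.insert m.1 ((PySem.Dict.empty : PySem.Dict String Int).insert m.2.2 1)
      else dd.insert m.1 ((dd.getD m.1 PySem.Dict.empty).insert m.2.2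
        ((dd.getD m.1 PySem.Dict.empty).getD m.2.2 0 + 1)) := by
  unfold stepA_do_reduce
  by_cases hc : dd.contains m.1 = false
  · rw [if_pos hc, if_pos hc]
  · rw [if_neg hc, if_neg hc]
    cases hg : (dd.getD m.1 PySem.Dict.empty).get? m.2.2 with
    | none =>
        show dd.insert m.1 ((dd.getD m.1 PySem.Dict.empty).insert m.2.2 1) = _
        rw [PySem.Dict.getD_eq_get?_getD (dd.getD m.1 PySem.Dict.empty) m.2.2 0, hg]
        norm_num
    | some v =>
        show dd.insert m.1 ((dd.getD m.1 PySem.Dict.empty).insert m.2.2 (v + 1)) = _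
        rw [PySem.Dict.getD_eq_get?_getD (dd.getD m.1 PySem.Dict.empty) m.2.2 0, hg]
        rfl

-- stepB on the closed form
theorem stepB_gSpec (l : List ((String × String) × Int)) (p : (String × String) × Int)
    (hnd : ((l ++ [p]).map (fun q => q.1)).Nodup) :
    stepB_do_reduce (gSpec l) p = gSpec (l ++ [p]) := by
  obtain ⟨⟨w, c⟩, v⟩ := p
  have hpl : (w, c) ∉ l.map (fun q => q.1) := by
    rw [List.map_append] at hnd
    intro hm
    exact (List.nodup_append.mp hnd).2.2 _ hm (w, c) (by simp) rfl
  rw [stepB_eq]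
  show (if (gSpec l).contains w = false then
          (gSpec l).insert w ((PySem.Dict.empty : PySem.Dict String Int).insert c v)
        else (gSpec l).insert w (((gSpec l).getD w PySem.Dict.empty).insert c v))
      = gSpec (l ++ [((w, c), v)])
  by_cases hw : w ∈ gKeys l
  · rw [if_neg (by rw [gSpec_contains]; simp [hw]), gSpec_getD l w hw]
    have hcnot : ((PySem.Dict.mk (gVal l w)).contains c) = false := by
      rw [PySem.Dict.contains_eq_decide_mem_keys, PySem.Dict.keys_mk]
      simp only [decide_eq_false_iff_not]
      intro hc
      obtain ⟨e, hem, he1⟩ := List.mem_map.mp hc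
      have hmem : (c, e.2) ∈ gVal l w := by
        have he : e = (c, e.2) := by cases e; simp_all
        rwa [he] at hem
      exact hpl (List.mem_map.mpr ⟨((w, c), e.2), (mem_gVal_iff l w c e.2).mp hmem, rfl⟩)
    have hins : (PySem.Dict.mk (gVal l w)).insert c v
        = PySem.Dict.mk (gVal (l ++ [((w, c), v)]) w) := by
      apply PySem.Dict.ext
      rw [PySem.Dict.items_insert_of_not_contains _ v hcnot]
      show gVal l w ++ [(c, v)] = _
      rw [gVal_append]
      simp
    rw [hins]
    unfold gSpec
    rw [mkmap_insert _ _ _ _ hw, gKeys_append, if_pos hw]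
    congr 1
    apply List.map_congr_left
    intro k hk
    by_cases hkw : k = w
    · subst hkw; simp
    · have hbw : ((w : String) == k) = false := by
        rw [beq_eq_false_iff_ne]; exact fun h => hkw h.symm
      simp [hkw, gVal_append, hbw]
  · rw [if_pos (by rw [gSpec_contains]; simp [hw])]
    apply PySem.Dict.ext
    rw [PySem.Dict.items_insert_of_not_contains _ _ (by rw [gSpec_contains]; simp [hw])]
    show ((gKeys l).map (fun k => (k, PySem.Dict.mk (gVal l k))))
        ++ [(w, (PySem.Dict.empty : PySem.Dict String Int).insert c v)]
      = (gSpec (l ++ [((w, c), v)])).items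
    unfold gSpec
    rw [gKeys_append, if_neg hw, List.map_append]
    congr 1
    · apply List.map_congr_left
      intro k hk
      have hkw : k ≠ w := fun h => hw (h ▸ hk)
      have hbw : ((w : String) == k) = false := by
        rw [beq_eq_false_iff_ne]; exact fun h => hkw h.symm
      simp [gVal_append, hbw]
    · have hgv : gVal (l ++ [((w, c), v)]) w = [(c, v)] := by
        rw [gVal_append, gVal_nil_of_not_mem l w hw]; simp
      show [(w, (PySem.Dict.empty : PySem.Dict String Int).insert c v)]
          = [(w, PySem.Dict.mk (gVal (l ++ [((w, c), v)]) w))]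
      rw [hgv]
      rfl

theorem foldB_eq_gSpec (l : List ((String × String) × Int))
    (hnd : (l.map (fun q => q.1)).Nodup) :
    l.foldl stepB_do_reduce PySem.Dict.empty = gSpec l := by
  induction l using List.reverseRecOn with
  | nil => rfl
  | append_singleton l p ih =>
      rw [List.foldl_append, List.foldl_cons, List.foldl_nil,
        ih (by rw [List.map_append] at hnd; exact (List.nodup_append.mp hnd).1)]
      exact stepB_gSpec l p hnd

-- in-place replacement of one flat pair, seen through gKeys/gVal
theorem gKeys_map_replace (l : List ((String × String) × Int)) (w c : String) (nv : Int) :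
    gKeys (l.map (fun r => if r.1 == (w, c) then ((w, c), nv) else r)) = gKeys l := by
  unfold gKeys
  rw [List.map_map]
  congr 1
  apply List.map_congr_left
  intro r _
  by_cases hb : r.1 = (w, c)
  · simp [hb]
  · simp [hb]

theorem gVal_map_replace_self (l : List ((String × String) × Int)) (w c : String) (nv : Int) :
    gVal (l.map (fun r => if r.1 == (w, c) then ((w, c), nv) else r)) w
      = (gVal l w).map (fun e => if e.1 == c then (c, nv) else e) := by
  induction l with
  | nil => rfl
  | cons r l ih =>
      rw [List.map_cons, gVal_cons, gVal_cons, List.map_append, ih]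
      congr 1
      by_cases hb : r.1 = (w, c)
      · simp [hb]
      · by_cases hw : r.1.1 = w
        · have hne : r.1.2 ≠ c := by
            intro h
            apply hb
            obtain ⟨⟨a, b⟩, y⟩ := r
            simp_all
          simp [hb, hw, hne]
        · simp [hb, hw]

theorem gVal_map_replace_other (l : List ((String × String) × Int)) (w c k : String) (nv : Int)
    (hkw : k ≠ w) :
    gVal (l.map (fun r => if r.1 == (w, c) then ((w, c), nv) else r)) k = gVal l k := by
  induction l with
  | nil => rfl
  | cons r l ih =>
      rw [List.map_cons, gVal_cons, gVal_cons, ih]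
      congr 1
      by_cases hb : r.1 = (w, c)
      · have hkb : w ≠ k := fun h => hkw h.symm
        simp [hb, hkb]
      · simp [hb]

-- stepA commutes with the flat update through gSpec
theorem stepA_gSpec (f : PySem.Dict (String × String) Int) (m : String × String × String)
    (hnd : f.keys.Nodup) :
    stepA_do_reduce (gSpec f.items) m = gSpec (stepFlat_do_reduce f m).items := by
  obtain ⟨w, d, c⟩ := m
  have hndl : (f.items.map (fun q => q.1)).Nodup := hnd
  by_cases hwc : (w, c) ∈ f.items.map (fun q => q.1)
  · -- the pair is present: the flat dict updates in place, A bumps the inner count in place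
    have hcont : f.contains (w, c) = true := by
      rw [PySem.Dict.contains_eq_decide_mem_keys]
      simp only [PySem.Dict.keys]
      simp [hwc]
    obtain ⟨q, hq, hq1⟩ := List.mem_map.mp hwc
    have hqe : ((w, c), q.2) ∈ f.items := by
      have : q = ((w, c), q.2) := by cases q; simp_all
      rwa [← this]
    have hget : f.get? (w, c) = some q.2 := PySem.Dict.get?_of_mem_items f hqe hnd
    have hgetD : f.getD (w, c) 0 = q.2 := PySem.Dict.getD_of_get?_eq_some f 0 hget
    have hflat : (stepFlat_do_reduce f (w, d, c)).items
        = f.items.map (fun r => if r.1 == (w, c) then ((w, c), q.2 + 1) else r) := by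
      show (f.insert (w, c) (f.getD (w, c) 0 + 1)).items = _
      rw [hgetD]
      exact PySem.Dict.items_insert_of_contains f _ hcont
    have hwk : w ∈ gKeys f.items := by
      rw [mem_gKeys]
      exact List.mem_map.mpr ⟨q, hq, by cases q; simp_all⟩
    have hcv : (c, q.2) ∈ gVal f.items w := (mem_gVal_iff _ _ _ _).mpr hqe
    have hndv := nodup_gVal_keys f.items hndl w
    have hgc : (PySem.Dict.mk (gVal f.items w)).get? c = some q.2 :=
      PySem.Dict.get?_of_mem_items _ hcv (by simpa [PySem.Dict.keys_mk] using hndv)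
    have hcontw : (gSpec f.items).contains w = true := by rw [gSpec_contains]; simp [hwk]
    rw [stepA_eq]
    show (if (gSpec f.items).contains w = false then
            (gSpec f.items).insert w ((PySem.Dict.empty : PySem.Dict String Int).insert c 1)
          else (gSpec f.items).insert w (((gSpec f.items).getD w PySem.Dict.empty).insert c
            (((gSpec f.items).getD w PySem.Dict.empty).getD c 0 + 1)))
        = gSpec (stepFlat_do_reduce f (w, d, c)).items
    rw [if_neg (by simp [hcontw]), gSpec_getD f.items w hwk,
      PySem.Dict.getD_of_get?_eq_some _ 0 hgc]
    have hins : (PySem.Dict.mk (gVal f.items w)).insert c (q.2 + 1)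
        = PySem.Dict.mk ((gVal f.items w).map (fun e => if e.1 == c then (c, q.2 + 1) else e)) := by
      apply PySem.Dict.ext
      exact PySem.Dict.items_insert_of_contains _ _
        (by rw [PySem.Dict.contains_eq_decide_mem_keys, PySem.Dict.keys_mk]
            simp only [decide_eq_true_eq]
            exact List.mem_map.mpr ⟨(c, q.2), hcv, rfl⟩)
    rw [hins, hflat]
    unfold gSpec
    rw [mkmap_insert _ _ _ _ hwk, gKeys_map_replace]
    apply PySem.Dict.ext
    apply List.map_congr_left
    intro k hk
    by_cases hkw : k = w
    · subst hkw
      rw [if_pos rfl, gVal_map_replace_self]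
    · rw [if_neg hkw, gVal_map_replace_other _ _ _ _ _ hkw]
  · -- fresh pair: the flat dict appends ((w,c),1); A's step is B's step on that new item
    have hcont : f.contains (w, c) = false := by
      rw [PySem.Dict.contains_eq_decide_mem_keys]
      simp only [PySem.Dict.keys]
      simp [hwc]
    have hflat : (stepFlat_do_reduce f (w, d, c)).items = f.items ++ [((w, c), 1)] := by
      show (f.insert (w, c) (f.getD (w, c) 0 + 1)).items = _
      rw [PySem.Dict.getD_of_not_contains f 0 hcont]
      simpa using PySem.Dict.items_insert_of_not_contains f _ hcont
    rw [hflat]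
    rw [← stepB_gSpec f.items ((w, c), 1)
        (by rw [List.map_append]
            exact List.nodup_append.mpr ⟨hndl, by simp, by
              intro a ha b hb
              simp only [List.map_cons, List.map_nil, List.mem_singleton] at hb
              subst hb
              intro h; exact hwc (h ▸ ha)⟩)]
    rw [stepA_eq, stepB_eq]
    show (if (gSpec f.items).contains w = false then
            (gSpec f.items).insert w ((PySem.Dict.empty : PySem.Dict String Int).insert c 1)
          else (gSpec f.items).insert w (((gSpec f.items).getD w PySem.Dict.empty).insert c
            (((gSpec f.items).getD w PySem.Dict.empty).getD c 0 + 1)))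
        = (if (gSpec f.items).contains w = false then
            (gSpec f.items).insert w ((PySem.Dict.empty : PySem.Dict String Int).insert c 1)
          else (gSpec f.items).insert w (((gSpec f.items).getD w PySem.Dict.empty).insert c 1))
    by_cases hw : w ∈ gKeys f.items
    · rw [if_neg (by rw [gSpec_contains]; simp [hw]), if_neg (by rw [gSpec_contains]; simp [hw]),
        gSpec_getD f.items w hw]
      have hcnotc : ((PySem.Dict.mk (gVal f.items w)).contains c) = false := by
        rw [PySem.Dict.contains_eq_decide_mem_keys, PySem.Dict.keys_mk]
        simp only [decide_eq_false_iff_not]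
        intro hc
        obtain ⟨e, hem, he1⟩ := List.mem_map.mp hc
        have hmem : (c, e.2) ∈ gVal f.items w := by
          have he : e = (c, e.2) := by cases e; simp_all
          rwa [he] at hem
        exact hwc (List.mem_map.mpr ⟨((w, c), e.2), (mem_gVal_iff _ _ _ _).mp hmem, rfl⟩)
      rw [PySem.Dict.getD_of_not_contains _ 0 hcnotc]
      norm_num
    · rw [if_pos (by rw [gSpec_contains]; simp [hw]), if_pos (by rw [gSpec_contains]; simp [hw])]

theorem foldA_gSpec (maps : List (String × String × String)) (f : PySem.Dict (String × String) Int)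
    (hnd : f.keys.Nodup) :
    maps.foldl stepA_do_reduce (gSpec f.items) = gSpec ((maps.foldl stepFlat_do_reduce f).items) := by
  induction maps generalizing f with
  | nil => rfl
  | cons m ms ih =>
      simp only [List.foldl_cons, stepA_gSpec f m hnd]
      exact ih _ (PySem.Dict.nodup_keys_insert f (m.1, m.2.2) (f.getD (m.1, m.2.2) 0 + 1) hnd)

-- ===== VERDICT (by name: the statement is the Claim_ definition above) =====
theorem do_reduce_py_spec : Claim_equal_do_reduce_py := by
  intro maps _
  unfold Spec_do_reduce_py do_reduce_py do_reduce_py_alt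
  have hnd : ((maps.foldl stepFlat_do_reduce PySem.Dict.empty).keys).Nodup :=
    PySem.Dict.nodup_keys_foldl_insert_key maps (fun m => (m.1, m.2.2))
      (fun f m => f.getD (m.1, m.2.2) 0 + 1) PySem.Dict.empty PySem.Dict.nodup_keys_empty
  have h1 : maps.foldl stepA_do_reduce PySem.Dict.empty
      = gSpec ((maps.foldl stepFlat_do_reduce PySem.Dict.empty).items) :=
    foldA_gSpec maps PySem.Dict.empty PySem.Dict.nodup_keys_empty
  have h2 := foldB_eq_gSpec ((maps.foldl stepFlat_do_reduce PySem.Dict.empty).items) hnd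
  simp only [h1, h2]
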